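-- pv_equiv track=rewrite | github.com/sean185/aoc | 2024/d09.py | part1
-- ===== SOURCE A (Python) =====
-- def part1(res):
--     while None in res:
--         i = res.index(None)
--         j = len(res) - 1
--         if res[j] is not None:
--             res[i] = res[j]
--         res.pop(j)
--     return res
-- ===== SOURCE B (Python) =====
-- def part1(res):
--     # Note: A mutates res in place and returns it; B leaves res untouched and
--     # returns a new list (equivalence claimed for the return value only).
--     keep = [x for x in res if x is not None]
--     out = []
--     for x in res[:len(keep)]:
--         out.append(x if x is not None else keep.pop())
--     return out
-- ===== Notes on version B (the rewrite author's own statement) =====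
-- stated objective: faster
-- what changed: Replaces A's repeated membership-test/index/pop while-loop (each pass rescans the list) by one filter pass collecting the non-None values plus one pass over the kept prefix that fills each gap by popping from the end of that collection; A's in-place mutation of res is not reproduced, only the return value is matched.
import Mathlib
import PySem

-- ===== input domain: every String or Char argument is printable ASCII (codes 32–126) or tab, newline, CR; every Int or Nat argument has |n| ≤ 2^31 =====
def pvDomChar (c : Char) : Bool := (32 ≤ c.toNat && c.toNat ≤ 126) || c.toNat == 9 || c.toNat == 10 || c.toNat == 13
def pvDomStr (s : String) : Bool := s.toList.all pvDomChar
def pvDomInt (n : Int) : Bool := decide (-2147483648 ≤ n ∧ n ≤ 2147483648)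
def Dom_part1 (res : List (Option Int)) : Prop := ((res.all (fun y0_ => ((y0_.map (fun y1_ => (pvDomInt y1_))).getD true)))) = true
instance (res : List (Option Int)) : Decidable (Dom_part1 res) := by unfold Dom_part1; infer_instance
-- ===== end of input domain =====

-- B replaces A's quadratic scan/index/pop while-loop by one filter pass plus one fill pass
-- (A also mutates res in place; B does not — the equivalence is about the return value only).

-- ===== PORT A =====
-- while None in res: i = res.index(None); j = len(res)-1; if res[j] is not None: res[i] = res[j]; res.pop(j)
def part1 (res : List (Option Int)) : List (Option Int) :=
  if h : none ∈ res then
    let i : Nat := (PySem.List.index? res none).getD 0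
    let j : Int := (res.length : Int) - 1
    let last : Option Int := (PySem.List.pyGet? res j).getD none
    let res' := if last ≠ none then res.set i last else res
    part1 res'.dropLast                         -- res.pop(j): j is the last index, so pop = dropLast
  else res
termination_by res.length
decreasing_by
  have hpos : 0 < res.length := List.length_pos_of_ne_nil (List.ne_nil_of_mem h)
  rw [List.length_dropLast]
  split <;> (simp; omega)

-- ===== PORT B =====
-- keep = [x for x in res if x is not None]; out = []; for x in res[:len(keep)]: out.append(x if x is not None else keep.pop())
def part1_alt (res : List (Option Int)) : List (Option Int) :=
  let keep := res.filter (fun x => x.isSome)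
  let st := (res.take keep.length).foldl
    (fun (acc : List (Option Int) × List (Option Int)) x =>
      match x with
      | some v => (acc.1 ++ [some v], acc.2)
      | none => (acc.1 ++ [acc.2.getLast?.getD none], acc.2.dropLast))  -- keep.pop(); getD unreachable
    ([], keep)
  st.1

-- ===== PRECONDITION & SPEC =====
def Spec_part1 (res : List (Option Int)) (out : List (Option Int)) : Prop := out = part1_alt res
instance (res : List (Option Int)) (out : List (Option Int)) : Decidable (Spec_part1 res out) := by unfold Spec_part1; infer_instance

-- ===== CLAIM (what is proved, stated in full; the proofs are below) =====
def Claim_equal_part1 : Prop := ∀ (res : List (Option Int)), Dom_part1 res → Spec_part1 res (part1 res)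

-- ===== LEMMAS AND PROOFS =====

-- cons-recursion form of B's fill loop: emit kept values, fill gaps from the end of the stack
def pvGo : List (Option Int) → List (Option Int) → List (Option Int)
  | [], _ => []
  | some v :: xs, s => some v :: pvGo xs s
  | none :: xs, s => (s.getLast?.getD none) :: pvGo xs s.dropLast

def pvSpec (res : List (Option Int)) : List (Option Int) :=
  pvGo (res.take (res.filter (fun x => x.isSome)).length) (res.filter (fun x => x.isSome))

theorem pvGo_foldl (xs : List (Option Int)) : ∀ (s acc : List (Option Int)),
    (xs.foldl
      (fun (acc : List (Option Int) × List (Option Int)) x =>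
        match x with
        | some v => (acc.1 ++ [some v], acc.2)
        | none => (acc.1 ++ [acc.2.getLast?.getD none], acc.2.dropLast))
      (acc, s)).1 = acc ++ pvGo xs s := by
  induction xs with
  | nil => intro s acc; simp [pvGo]
  | cons x xs ih =>
    intro s acc
    cases x with
    | some v => simp [pvGo, ih]
    | none => simp [pvGo, ih]

theorem alt_eq_pvSpec (res : List (Option Int)) : part1_alt res = pvSpec res := by
  unfold part1_alt pvSpec
  exact pvGo_foldl _ _ []

theorem pvGo_some_prefix (p : List (Option Int)) (hp : none ∉ p) :
    ∀ (xs s : List (Option Int)), pvGo (p ++ xs) s = p ++ pvGo xs s := by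
  induction p with
  | nil => intro xs s; simp
  | cons x p ih =>
    intro xs s
    cases x with
    | none => exact absurd (List.mem_cons_self) hp
    | some v =>
      have : none ∉ p := fun h => hp (List.mem_cons_of_mem _ h)
      simp [pvGo, ih this]

theorem pvGo_all_some (xs : List (Option Int)) (hp : none ∉ xs) (s : List (Option Int)) :
    pvGo xs s = xs := by
  have := pvGo_some_prefix xs hp [] s
  simpa [pvGo] using this

theorem pvGo_congr (xs : List (Option Int)) : ∀ (a b t : List (Option Int)),
    xs.countP (fun x => x.isNone) ≤ t.length →
    pvGo xs (a ++ t) = pvGo xs (b ++ t) := by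
  induction xs with
  | nil => intro a b t _; simp [pvGo]
  | cons x xs ih =>
    intro a b t hc
    cases x with
    | some v =>
      simp only [List.countP_cons] at hc
      simp [pvGo, ih a b t (by simpa using hc)]
    | none =>
      have hc' : xs.countP (fun x => x.isNone) + 1 ≤ t.length := by
        simpa using hc
      have ht : t ≠ [] := by
        intro h; subst h; simp at hc'
      have hget : ∀ (c : List (Option Int)), (c ++ t).getLast? = t.getLast? := fun c =>
        List.getLast?_append_of_ne_nil c ht
      have hdrop : ∀ (c : List (Option Int)), (c ++ t).dropLast = c ++ t.dropLast := fun c =>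
        List.dropLast_append_of_ne_nil ht
      have hlen : xs.countP (fun x => x.isNone) ≤ t.dropLast.length := by
        rw [List.length_dropLast]; omega
      simp [pvGo, hget, hdrop, ih a b t.dropLast hlen]

theorem filter_all_some (p : List (Option Int)) (hp : none ∉ p) :
    p.filter (fun x => x.isSome) = p := by
  apply List.filter_eq_self.mpr
  intro a ha
  cases a with
  | none => exact absurd ha hp
  | some v => rfl

-- the core step: filling the first gap with the popped last element preserves pvSpec
theorem pvSpec_step (p q : List (Option Int)) (v : Int) (hp : none ∉ p) :
    pvSpec (p ++ none :: (q ++ [some v])) = pvSpec (p ++ some v :: q) := by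
  unfold pvSpec
  have hfp := filter_all_some p hp
  have hkq : (q.filter (fun x => x.isSome)).length ≤ q.length := List.length_filter_le _ _
  have hfl : (p ++ none :: (q ++ [some v])).filter (fun x => x.isSome)
      = p ++ ((q.filter (fun x => x.isSome)) ++ [some v]) := by
    simp [List.filter_append, hfp]
  have hfr : (p ++ some v :: q).filter (fun x => x.isSome)
      = p ++ some v :: q.filter (fun x => x.isSome) := by
    simp [List.filter_append, hfp]
  rw [hfl, hfr]
  set k := (q.filter (fun x => x.isSome)).length with hk
  have hlen1 : (p ++ ((q.filter (fun x => x.isSome)) ++ [some v])).length = p.length + (k + 1) := by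
    simp [hk]
  have hlen2 : (p ++ some v :: q.filter (fun x => x.isSome)).length = p.length + (k + 1) := by
    simp [hk]
  rw [hlen1, hlen2]
  have htl : (p ++ none :: (q ++ [some v])).take (p.length + (k + 1))
      = p ++ none :: q.take k := by
    rw [List.take_append]
    congr 1
    · exact List.take_of_length_le (by omega)
    · have : p.length + (k + 1) - p.length = k + 1 := by omega
      rw [this, List.take_succ_cons, List.take_append_of_le_length hkq]
  have htr : (p ++ some v :: q).take (p.length + (k + 1))
      = p ++ some v :: q.take k := by
    rw [List.take_append]
    congr 1
    · exact List.take_of_length_le (by omega)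
    · have : p.length + (k + 1) - p.length = k + 1 := by omega
      rw [this, List.take_succ_cons]
  rw [htl, htr, pvGo_some_prefix p hp, pvGo_some_prefix p hp]
  congr 1
  simp only [pvGo]
  have h1 : (p ++ ((q.filter (fun x => x.isSome)) ++ [some v])).getLast?.getD none = some v := by
    rw [← List.append_assoc]; simp
  have h2 : (p ++ ((q.filter (fun x => x.isSome)) ++ [some v])).dropLast
      = p ++ q.filter (fun x => x.isSome) := by
    rw [← List.append_assoc]; simp
  rw [h1, h2]
  congr 1
  have hcnt : (q.take k).countP (fun x => x.isNone) ≤ k := by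
    calc (q.take k).countP (fun x => x.isNone) ≤ (q.take k).length := List.countP_le_length
    _ ≤ k := by simp
  have := pvGo_congr (q.take k) p (p ++ [some v]) (q.filter (fun x => x.isSome)) hcnt
  simpa using this

theorem pvSpec_drop_none (ys : List (Option Int)) :
    pvSpec (ys ++ [none]) = pvSpec ys := by
  unfold pvSpec
  have hf : (ys ++ [none]).filter (fun x => x.isSome) = ys.filter (fun x => x.isSome) := by
    simp [List.filter_append]
  rw [hf, List.take_append_of_le_length (List.length_filter_le _ _)]

theorem part1_eq_pvSpec (n : Nat) : ∀ (res : List (Option Int)), res.length ≤ n →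
    part1 res = pvSpec res := by
  induction n with
  | zero =>
    intro res hlen
    have : res = [] := List.eq_nil_of_length_eq_zero (by omega)
    subst this
    rw [part1.eq_def]
    simp [pvSpec, pvGo]
  | succ n ih =>
    intro res hlen
    by_cases h : none ∈ res
    · -- res is nonempty; split off its last element
      rcases res.eq_nil_or_concat with rfl | ⟨ys, x, rfl⟩
      · simp at h
      simp only [List.concat_eq_append] at h hlen ⊢
      cases x with
      | none =>
        -- last element is None: res[j] is None, just pop
        rw [part1.eq_def, dif_pos h]
        have hj : ((ys ++ [none]).length : Int) - 1 = ((ys.length : Nat) : Int) := by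
          simp
        have hget : PySem.List.pyGet? (ys ++ [(none : Option Int)]) (((ys ++ [none]).length : Int) - 1)
            = some none := by
          rw [hj]
          simp
        simp only [hget, Option.getD_some, ne_eq, not_true_eq_false, if_false]
        rw [List.dropLast_concat]
        have hys : ys.length ≤ n := by simp at hlen; omega
        rw [ih ys hys, pvSpec_drop_none]
      | some v =>
        -- last element is a value: fill the first gap with it, then pop
        have hyn : none ∈ ys := by
          rcases List.mem_append.mp h with h1 | h1
          · exact h1
          · simp at h1
        obtain ⟨i0, hi0⟩ := (PySem.List.index?_isSome_iff (xs := ys) (v := (none : Option Int))).mpr hyn |> Option.isSome_iff_exists.mp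
        obtain ⟨p, q, rfl, hplen, hpnm⟩ := (PySem.List.index?_eq_some_iff _ _ _).mp hi0
        rw [part1.eq_def, dif_pos h]
        have hidx : PySem.List.index? ((p ++ none :: q) ++ [some v]) (none : Option Int) = some p.length := by
          rw [PySem.List.index?_append_of_mem _ hyn, hi0, hplen]
        have hj : (((p ++ none :: q) ++ [some v]).length : Int) - 1 = (((p ++ none :: q).length : Nat) : Int) := by
          simp; omega
        have hget : PySem.List.pyGet? ((p ++ none :: q) ++ [(some v : Option Int)])
            ((((p ++ none :: q) ++ [some v]).length : Int) - 1) = some (some v) := by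
          rw [hj]
          simpa using PySem.List.pyGet?_append_length (pre := p ++ none :: q) (y := (some v : Option Int)) (ys := [])
        simp only [hidx, Option.getD_some, hget, ne_eq, reduceCtorEq, not_false_eq_true, if_true]
        have hset : (((p ++ none :: q) ++ [(some v : Option Int)]).set p.length (some v)).dropLast
            = p ++ some v :: q := by
          rw [List.append_assoc]
          rw [List.set_append_right _ _ (le_refl p.length)]
          simp [List.dropLast_append_of_ne_nil]
          rw [show some v :: (q ++ [some v]) = (some v :: q) ++ [some v] by simp,
            List.dropLast_concat]
        rw [hset]
        have hlt : (p ++ some v :: q).length ≤ n := by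
          simp at hlen ⊢; omega
        rw [ih _ hlt]
        rw [List.append_assoc]
        exact (pvSpec_step p q v hpnm).symm
    · -- no None left: A returns res; B keeps everything
      rw [part1.eq_def, dif_neg h]
      unfold pvSpec
      rw [filter_all_some res h, List.take_length, pvGo_all_some res h]

-- ===== VERDICT (by name: the statement is the Claim_ definition above) =====
theorem part1_spec : Claim_equal_part1 := by
  intro res _
  unfold Spec_part1
  rw [alt_eq_pvSpec, part1_eq_pvSpec res.length res le_rfl]
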